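-- pv_equiv track=rewrite | github.com/myeonghwan57/keep_studing | solution/programmers/coding_test/Level2/solution_택배배달과수거하기.py | solution
-- ===== SOURCE A (Python) =====
-- def solution(cap, n, deliveries, pickups):
--     deliveries = deliveries[::-1]
--     pickups = pickups[::-1]
--     answer = 0
--
--     delivery = 0
--     pick = 0
--
--     for i in range(n):
--         delivery += deliveries[i]
--         pick += pickups[i]
--
--         while delivery > 0 or pick > 0:
--             delivery -= cap
--             pick -= cap
--             answer += (n - i) * 2
--
--     return answer
-- ===== SOURCE B (Python) =====
-- def solution(cap, n, deliveries, pickups):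
--     answer = 0
--     delivery = 0
--     pick = 0
--     for dist, dv, pv in zip(range(n, 0, -1), deliveries[::-1], pickups[::-1]):
--         delivery += dv
--         pick += pv
--         td = -(-delivery // cap) if delivery > 0 else 0
--         tp = -(-pick // cap) if pick > 0 else 0
--         trips = max(td, tp)
--         answer += trips * dist * 2
--         delivery -= trips * cap
--         pick -= trips * cap
--     return answer
-- ===== Notes on version B (the rewrite author's own statement) =====
-- stated objective: alternative
-- what changed: B eliminates A's inner while-loop (one iteration per truck trip) by computing each house's trip count in closed form with integer ceiling division, folding once over zip(range(n,0,-1), reversed deliveries, reversed pickups).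
import Mathlib
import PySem

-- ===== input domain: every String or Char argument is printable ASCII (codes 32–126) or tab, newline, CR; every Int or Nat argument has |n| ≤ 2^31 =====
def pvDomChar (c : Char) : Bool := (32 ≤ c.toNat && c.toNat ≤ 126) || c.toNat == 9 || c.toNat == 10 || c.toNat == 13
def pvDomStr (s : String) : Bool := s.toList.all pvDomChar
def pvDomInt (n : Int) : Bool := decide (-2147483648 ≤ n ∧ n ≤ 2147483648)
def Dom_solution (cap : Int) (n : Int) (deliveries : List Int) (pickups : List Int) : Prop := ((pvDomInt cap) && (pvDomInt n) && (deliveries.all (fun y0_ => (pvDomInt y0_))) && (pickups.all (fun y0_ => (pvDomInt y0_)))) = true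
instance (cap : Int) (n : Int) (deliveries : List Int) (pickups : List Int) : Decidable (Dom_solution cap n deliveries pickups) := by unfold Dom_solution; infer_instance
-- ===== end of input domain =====

-- B replaces A's inner while loop (one iteration per truck trip) by a closed-form
-- integer ceiling-division trip count per house, folded once over the zipped reversed lists.

-- ===== PORT A =====
-- the 'while delivery > 0 or pick > 0' loop; fuel bounds the recursion for totality only:
-- under Pre_ (1 ≤ cap) the loop exits before the fuel runs out (Python loops forever when cap ≤ 0 and some demand stays positive)
def pvWhileA (cap dist : Int) : Nat → Int → Int → Int → Int × Int × Int
  | 0, d, p, ans => (d, p, ans)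
  | f+1, d, p, ans =>
      if 0 < d ∨ 0 < p then pvWhileA cap dist f (d - cap) (p - cap) (ans + dist * 2)
      else (d, p, ans)

-- the 'for i in range(n)' loop; rds/rps are the reversed lists; returns the IndexError-free answer
def pvForA (cap n : Int) (rds rps : List Int) : Nat → Nat → Int → Int → Int → Int
  | 0, _, _, _, ans => ans
  | k+1, i, d, p, ans =>
      match PySem.List.pyGet? rds (Int.ofNat i), PySem.List.pyGet? rps (Int.ofNat i) with
      | some dv, some pv =>
          let d' := d + dv
          let p' := p + pv
          let s := pvWhileA cap (n - Int.ofNat i) (max d' p').toNat d' p' ans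
          pvForA cap n rds rps k (i+1) s.1 s.2.1 s.2.2
      | _, _ => ans   -- deliveries[i]/pickups[i] IndexError; excluded by Pre_

def solution (cap : Int) (n : Int) (deliveries : List Int) (pickups : List Int) : Int :=
  -- deliveries[::-1] / pickups[::-1]; step -1 ≠ 0 so slice? is always some
  pvForA cap n ((PySem.List.slice? deliveries none none (-1)).getD [])
              ((PySem.List.slice? pickups none none (-1)).getD []) n.toNat 0 0 0 0

-- ===== PORT B =====
-- '(-(-x // cap)) if x > 0 else 0' : integer ceiling of x / cap, clamped at 0
def pvCeil (cap x : Int) : Int := if 0 < x then -(PySem.Int.floordiv (-x) cap) else 0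

def pvStepB (cap : Int) (s : Int × Int × Int) (x : Int × (Int × Int)) : Int × Int × Int :=
  match s, x with
  | (d, p, ans), (dist, dv, pv) =>
    let d := d + dv
    let p := p + pv
    let trips := max (pvCeil cap d) (pvCeil cap p)
    (d - trips * cap, p - trips * cap, ans + trips * dist * 2)

def solution_alt (cap : Int) (n : Int) (deliveries : List Int) (pickups : List Int) : Int :=
  -- zip(range(n, 0, -1), deliveries[::-1], pickups[::-1]) as a zip of a countdown range with a zip
  (((PySem.List.pyRange n 0 (-1)).zip
      ((((PySem.List.slice? deliveries none none (-1)).getD [])).zip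
        ((PySem.List.slice? pickups none none (-1)).getD []))).foldl (pvStepB cap) (0, 0, 0)).2.2

-- ===== PRECONDITION & SPEC =====
-- Pre_ excludes exactly (i) cap ≤ 0 when some running far-to-near demand becomes positive, where A's
-- while loop never terminates (and cap = 0 would divide by zero in B), and (ii) n > len(deliveries)
-- or n > len(pickups), where A raises IndexError.
def Pre_solution (cap : Int) (n : Int) (deliveries : List Int) (pickups : List Int) : Prop :=
  (1 ≤ cap ∨
    ((∀ i : Nat, i < n.toNat → (deliveries.reverse.take (i + 1)).sum ≤ 0) ∧
     (∀ i : Nat, i < n.toNat → (pickups.reverse.take (i + 1)).sum ≤ 0))) ∧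
    n ≤ (deliveries.length : Int) ∧ n ≤ (pickups.length : Int)
instance (cap : Int) (n : Int) (deliveries : List Int) (pickups : List Int) : Decidable (Pre_solution cap n deliveries pickups) := by unfold Pre_solution; infer_instance

def pvWitness_solution : Int × Int × List Int × List Int := (4, 3, [2, 5, 1], [0, 3, 2])

def Spec_solution (cap : Int) (n : Int) (deliveries : List Int) (pickups : List Int) (out : Int) : Prop := out = solution_alt cap n deliveries pickups
instance (cap : Int) (n : Int) (deliveries : List Int) (pickups : List Int) (out : Int) : Decidable (Spec_solution cap n deliveries pickups out) := by unfold Spec_solution; infer_instance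

-- ===== CLAIM (what is proved, stated in full; the proofs are below) =====
def Claim_equal_solution : Prop := ∀ (cap : Int) (n : Int) (deliveries : List Int) (pickups : List Int), Dom_solution cap n deliveries pickups → Pre_solution cap n deliveries pickups → Spec_solution cap n deliveries pickups (solution cap n deliveries pickups)

-- ===== LEMMAS AND PROOFS =====

-- characterisation of the number of trips a house needs
def IsK (cap d p t : Int) : Prop :=
  0 ≤ t ∧ d ≤ cap * t ∧ p ≤ cap * t ∧ (1 ≤ t → cap * (t - 1) < d ∨ cap * (t - 1) < p)

theorem pvCeil_spec (cap x : Int) (hc : 1 ≤ cap) :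
    0 ≤ pvCeil cap x ∧ x ≤ cap * pvCeil cap x ∧ (1 ≤ pvCeil cap x → cap * (pvCeil cap x - 1) < x) := by
  unfold pvCeil
  split_ifs with hx
  · have h := (PySem.Int.neg_floordiv_neg_eq_iff_of_pos (a := x) (b := cap)
      (q := -(PySem.Int.floordiv (-x) cap)) (by omega)).mp rfl
    obtain ⟨h1, h2⟩ := h
    set t := -(PySem.Int.floordiv (-x) cap) with ht
    refine ⟨?_, by nlinarith, fun _ => by nlinarith⟩
    nlinarith
  · exact ⟨le_refl 0, by nlinarith, by omega⟩

theorem isK_formula (cap d p : Int) (hc : 1 ≤ cap) :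
    IsK cap d p (max (pvCeil cap d) (pvCeil cap p)) := by
  obtain ⟨hd0, hd1, hd2⟩ := pvCeil_spec cap d hc
  obtain ⟨hp0, hp1, hp2⟩ := pvCeil_spec cap p hc
  have hmd : cap * pvCeil cap d ≤ cap * max (pvCeil cap d) (pvCeil cap p) :=
    mul_le_mul_of_nonneg_left (le_max_left _ _) (by omega)
  have hmp : cap * pvCeil cap p ≤ cap * max (pvCeil cap d) (pvCeil cap p) :=
    mul_le_mul_of_nonneg_left (le_max_right _ _) (by omega)
  refine ⟨le_trans hd0 (le_max_left _ _), by linarith, by linarith, fun h1 => ?_⟩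
  rcases max_choice (pvCeil cap d) (pvCeil cap p) with hm | hm <;> rw [hm] at h1 ⊢
  · exact Or.inl (hd2 h1)
  · exact Or.inr (hp2 h1)

theorem isK_unique_aux (cap d p t1 t2 : Int) (hc : 1 ≤ cap)
    (h1 : IsK cap d p t1) (h2 : IsK cap d p t2) (hlt : t1 < t2) : False := by
  obtain ⟨ha0, ha1, ha2, _⟩ := h1
  obtain ⟨_, _, _, hb3⟩ := h2
  have ht2 : 1 ≤ t2 := by omega
  have hmono : cap * t1 ≤ cap * (t2 - 1) := mul_le_mul_of_nonneg_left (by omega) (by omega)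
  rcases hb3 ht2 with h | h <;> linarith

theorem isK_unique (cap d p t1 t2 : Int) (hc : 1 ≤ cap)
    (h1 : IsK cap d p t1) (h2 : IsK cap d p t2) : t1 = t2 := by
  rcases lt_trichotomy t1 t2 with h | h | h
  · exact absurd (isK_unique_aux cap d p t1 t2 hc h1 h2 h) (fun f => f)
  · exact h
  · exact absurd (isK_unique_aux cap d p t2 t1 hc h2 h1 h) (fun f => f)

theorem isK_step (cap d p t : Int) (h : 0 < d ∨ 0 < p)
    (ht : IsK cap d p t) : IsK cap (d - cap) (p - cap) (t - 1) := by
  obtain ⟨h0, h1, h2, h3⟩ := ht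
  have ht1 : 1 ≤ t := by
    by_contra hn
    have ht0 : t = 0 := by omega
    subst ht0
    simp at h1 h2
    rcases h with h | h <;> linarith
  have e1 : cap * (t - 1) = cap * t - cap := by ring
  refine ⟨by omega, by linarith, by linarith, fun h4 => ?_⟩
  have e2 : cap * (t - 1 - 1) = cap * (t - 1) - cap := by ring
  rcases h3 ht1 with h5 | h5
  · exact Or.inl (by linarith)
  · exact Or.inr (by linarith)

theorem K_step (cap d p : Int) (hc : 1 ≤ cap) (h : 0 < d ∨ 0 < p) :
    max (pvCeil cap (d - cap)) (pvCeil cap (p - cap)) = max (pvCeil cap d) (pvCeil cap p) - 1 :=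
  isK_unique cap (d - cap) (p - cap) _ _ hc (isK_formula cap (d - cap) (p - cap) hc)
    (isK_step cap d p _ h (isK_formula cap d p hc))

theorem K_zero (cap d p : Int) (h : ¬ (0 < d ∨ 0 < p)) :
    max (pvCeil cap d) (pvCeil cap p) = 0 := by
  simp only [not_or, not_lt] at h
  unfold pvCeil
  rw [if_neg (by omega), if_neg (by omega)]
  simp

theorem K_pos (cap d p : Int) (hc : 1 ≤ cap) (h : 0 < d ∨ 0 < p) :
    1 ≤ max (pvCeil cap d) (pvCeil cap p) := by
  obtain ⟨h0, h1, -⟩ := pvCeil_spec cap d hc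
  obtain ⟨h0', h1', -⟩ := pvCeil_spec cap p hc
  by_contra hn
  have hd : pvCeil cap d = 0 := by omega
  have hp : pvCeil cap p = 0 := by omega
  rw [hd] at h1; rw [hp] at h1'
  simp at h1 h1'
  rcases h with h | h <;> linarith

theorem K_le_max (cap d p : Int) (hc : 1 ≤ cap) :
    (max (pvCeil cap d) (pvCeil cap p)).toNat ≤ (max d p).toNat := by
  obtain ⟨hk0, -, -, hk3⟩ := isK_formula cap d p hc
  set K := max (pvCeil cap d) (pvCeil cap p) with hK
  by_cases h1 : 1 ≤ K
  · have hb : K - 1 ≤ cap * (K - 1) := by nlinarith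
    rcases hk3 h1 with h | h
    · have : K - 1 < d := by linarith
      have : d ≤ max d p := le_max_left _ _
      omega
    · have : K - 1 < p := by linarith
      have : p ≤ max d p := le_max_right _ _
      omega
  · omega

-- A's inner while loop computes exactly B's closed-form trip count
theorem pvWhileA_eq (cap dist : Int) (hc : 1 ≤ cap) :
    ∀ (fuel : Nat) (d p ans : Int),
      (max (pvCeil cap d) (pvCeil cap p)).toNat ≤ fuel →
      pvWhileA cap dist fuel d p ans =
        (d - max (pvCeil cap d) (pvCeil cap p) * cap,
         p - max (pvCeil cap d) (pvCeil cap p) * cap,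
         ans + max (pvCeil cap d) (pvCeil cap p) * dist * 2) := by
  intro fuel
  induction fuel with
  | zero =>
    intro d p ans hf
    have h0 : 0 ≤ max (pvCeil cap d) (pvCeil cap p) :=
      le_trans (pvCeil_spec cap d hc).1 (le_max_left _ _)
    have hz : max (pvCeil cap d) (pvCeil cap p) = 0 := by omega
    rw [hz]
    simp [pvWhileA]
  | succ f ih =>
    intro d p ans hf
    by_cases h : 0 < d ∨ 0 < p
    · have hK1 := K_pos cap d p hc h
      have hstep := K_step cap d p hc h
      have h0 : 0 ≤ max (pvCeil cap (d - cap)) (pvCeil cap (p - cap)) :=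
        le_trans (pvCeil_spec cap (d - cap) hc).1 (le_max_left _ _)
      have hf' : (max (pvCeil cap (d - cap)) (pvCeil cap (p - cap))).toNat ≤ f := by omega
      rw [show pvWhileA cap dist (f + 1) d p ans
            = pvWhileA cap dist f (d - cap) (p - cap) (ans + dist * 2) by
          simp [pvWhileA, if_pos h]]
      rw [ih (d - cap) (p - cap) (ans + dist * 2) hf', hstep]
      refine congrArg₂ Prod.mk (by ring) (congrArg₂ Prod.mk (by ring) (by ring))
    · have hz := K_zero cap d p h
      rw [hz]
      simp [pvWhileA, if_neg h]

-- A's for-loop from position i equals B's fold over the remaining zipped triples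
theorem loop_eq (cap : Int) (hc : 1 ≤ cap) (n : Int) (rds rps : List Int)
    (h1 : n ≤ (rds.length : Int)) (h2 : n ≤ (rps.length : Int)) :
    ∀ (k i : Nat) (d p ans : Int), (i : Int) + (k : Int) = n →
      pvForA cap n rds rps k i d p ans =
        ((((PySem.List.pyRange n 0 (-1)).zip (rds.zip rps)).drop i).foldl
            (pvStepB cap) (d, p, ans)).2.2 := by
  intro k
  induction k with
  | zero =>
    intro i d p ans hi
    have : (((PySem.List.pyRange n 0 (-1)).zip (rds.zip rps)).drop i) = [] := by
      apply List.drop_eq_nil_of_le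
      rw [PySem.List.pyRange_neg_one]
      simp [List.length_zip]
      omega
    rw [this]
    simp [pvForA]
  | succ k ih =>
    intro i d p ans hi
    have hilt : i < rds.length := by omega
    have hilt' : i < rps.length := by omega
    have hin : i < (n - 0).toNat := by omega
    have hiz : i < ((PySem.List.pyRange n 0 (-1)).zip (rds.zip rps)).length := by
      rw [PySem.List.pyRange_neg_one]
      simp [List.length_zip]
      omega
    have hgd : PySem.List.pyGet? rds (Int.ofNat i) = some rds[i] := by
      rw [show (Int.ofNat i) = ((i : Nat) : Int) from rfl, PySem.List.pyGet?_natCast]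
      exact List.getElem?_eq_getElem hilt
    have hgp : PySem.List.pyGet? rps (Int.ofNat i) = some rps[i] := by
      rw [show (Int.ofNat i) = ((i : Nat) : Int) from rfl, PySem.List.pyGet?_natCast]
      exact List.getElem?_eq_getElem hilt'
    have hrange : (PySem.List.pyRange n 0 (-1))[i]'(by
        rw [PySem.List.pyRange_neg_one]; simpa using hin) = n - (i : Int) := by
      simp [PySem.List.pyRange_neg_one]
    have hdrop : ((PySem.List.pyRange n 0 (-1)).zip (rds.zip rps)).drop i
        = (n - (i : Int), (rds[i], rps[i])) :: ((PySem.List.pyRange n 0 (-1)).zip (rds.zip rps)).drop (i + 1) := by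
      rw [List.drop_eq_getElem_cons hiz]
      congr 1
      rw [List.getElem_zip]
      refine congrArg₂ Prod.mk hrange ?_
      exact List.getElem_zip
    rw [hdrop]
    simp only [pvForA, hgd, hgp]
    rw [pvWhileA_eq cap (n - Int.ofNat i) hc _ _ _ _ (K_le_max cap _ _ hc)]
    rw [List.foldl_cons]
    simp only [pvStepB]
    rw [ih (i + 1) _ _ _ (by push_cast; omega)]
    simp only [Int.ofNat_eq_natCast]

theorem pvWhileA_nonpos (cap dist : Int) (fuel : Nat) (d p ans : Int)
    (hd : d ≤ 0) (hp : p ≤ 0) : pvWhileA cap dist fuel d p ans = (d, p, ans) := by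
  cases fuel with
  | zero => rfl
  | succ f => simp [pvWhileA]; omega

theorem pvCeil_nonpos (cap x : Int) (hx : x ≤ 0) : pvCeil cap x = 0 := by
  unfold pvCeil
  rw [if_neg (by omega)]

-- the cap ≤ 0 twin of loop_eq: when every running demand stays nonpositive, neither loop dispatches a truck
theorem loop_eq_nonpos (cap : Int) (n : Int) (rds rps : List Int)
    (hda : ∀ j : Nat, j < n.toNat → (rds.take (j + 1)).sum ≤ 0)
    (hpa : ∀ j : Nat, j < n.toNat → (rps.take (j + 1)).sum ≤ 0)
    (h1 : n ≤ (rds.length : Int)) (h2 : n ≤ (rps.length : Int)) :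
    ∀ (k i : Nat) (d p ans : Int), d = (rds.take i).sum → p = (rps.take i).sum →
      (i : Int) + (k : Int) = n →
      pvForA cap n rds rps k i d p ans =
        ((((PySem.List.pyRange n 0 (-1)).zip (rds.zip rps)).drop i).foldl
            (pvStepB cap) (d, p, ans)).2.2 := by
  intro k
  induction k with
  | zero =>
    intro i d p ans hd hp hi
    have : (((PySem.List.pyRange n 0 (-1)).zip (rds.zip rps)).drop i) = [] := by
      apply List.drop_eq_nil_of_le
      rw [PySem.List.pyRange_neg_one]
      simp [List.length_zip]
      omega
    rw [this]
    simp [pvForA]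
  | succ k ih =>
    intro i d p ans hd hp hi
    have hilt : i < rds.length := by omega
    have hilt' : i < rps.length := by omega
    have hin : i < (n - 0).toNat := by omega
    have hiz : i < ((PySem.List.pyRange n 0 (-1)).zip (rds.zip rps)).length := by
      rw [PySem.List.pyRange_neg_one]
      simp [List.length_zip]
      omega
    have hgd : PySem.List.pyGet? rds (Int.ofNat i) = some rds[i] := by
      rw [show (Int.ofNat i) = ((i : Nat) : Int) from rfl, PySem.List.pyGet?_natCast]
      exact List.getElem?_eq_getElem hilt
    have hgp : PySem.List.pyGet? rps (Int.ofNat i) = some rps[i] := by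
      rw [show (Int.ofNat i) = ((i : Nat) : Int) from rfl, PySem.List.pyGet?_natCast]
      exact List.getElem?_eq_getElem hilt'
    have hrange : (PySem.List.pyRange n 0 (-1))[i]'(by
        rw [PySem.List.pyRange_neg_one]; simpa using hin) = n - (i : Int) := by
      simp [PySem.List.pyRange_neg_one]
    have hdrop : ((PySem.List.pyRange n 0 (-1)).zip (rds.zip rps)).drop i
        = (n - (i : Int), (rds[i], rps[i])) :: ((PySem.List.pyRange n 0 (-1)).zip (rds.zip rps)).drop (i + 1) := by
      rw [List.drop_eq_getElem_cons hiz]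
      congr 1
      rw [List.getElem_zip]
      refine congrArg₂ Prod.mk hrange ?_
      exact List.getElem_zip
    have hsumd : (rds.take (i + 1)).sum = d + rds[i] := by
      rw [List.sum_take_succ rds i hilt, hd]
    have hsump : (rps.take (i + 1)).sum = p + rps[i] := by
      rw [List.sum_take_succ rps i hilt', hp]
    have hd' : d + rds[i] ≤ 0 := by
      have := hda i (by omega)
      omega
    have hp' : p + rps[i] ≤ 0 := by
      have := hpa i (by omega)
      omega
    rw [hdrop]
    simp only [pvForA, hgd, hgp]
    rw [pvWhileA_nonpos cap (n - Int.ofNat i) _ _ _ _ hd' hp']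
    rw [List.foldl_cons]
    simp only [pvStepB, pvCeil_nonpos cap _ hd', pvCeil_nonpos cap _ hp',
      max_self, zero_mul, sub_zero, add_zero]
    exact ih (i + 1) _ _ _ hsumd.symm hsump.symm (by push_cast; omega)

-- ===== VERDICT (by name: the statement is the Claim_ definition above) =====
theorem solution_spec : Claim_equal_solution := by
  intro cap n ds ps hdom hpre
  obtain ⟨hcap, hn1, hn2⟩ := hpre
  unfold Spec_solution solution solution_alt
  simp only [PySem.List.slice?_none_none_neg_one, Option.getD_some]
  by_cases hn : 0 ≤ n
  · have h1 : n ≤ (ds.reverse.length : Int) := by simpa using hn1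
    have h2 : n ≤ (ps.reverse.length : Int) := by simpa using hn2
    rcases hcap with hc | ⟨hda, hpa⟩
    · rw [loop_eq cap hc n ds.reverse ps.reverse h1 h2 n.toNat 0 0 0 0 (by omega)]
      norm_num
    · rw [loop_eq_nonpos cap n ds.reverse ps.reverse hda hpa
            h1 h2 n.toNat 0 0 0 0 rfl rfl (by omega)]
      norm_num
  · have hz : n.toNat = 0 := by omega
    rw [hz, PySem.List.pyRange_neg_one_eq_nil (by omega)]
    simp [pvForA]
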